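-- pv_equiv track=rewrite | github.com/DiegoRCasallas/analizador_sintactico | Proyecto_2v3/sets.py | calcular_select
-- ===== SOURCE A (Python) =====
-- from copy import deepcopy
--
-- EPS = 'ε'
--
-- def first_de_secuencia(secuencia, FIRST):
--     resultado = set()
--     if secuencia == []:
--         resultado.add(EPS)
--         return resultado
--     for X in secuencia:
--         fx = FIRST.get(X, set())
--         resultado.update(x for x in fx if x != EPS)
--         if EPS in fx:
--             continue
--         else:
--             break
--     else:
--         resultado.add(EPS)
--     return resultado
--
-- def calcular_select(gramatica, FIRST, FOLLOW):
--     G = deepcopy(gramatica)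
--     select = {}
--     for A, prods in G.items():
--         for idx, prod in enumerate(prods):
--             if prod == [EPS]:
--                 select[(A, idx)] = set(FOLLOW[A])
--             else:
--                 first_alpha = first_de_secuencia(prod, FIRST)
--                 sel = set(x for x in first_alpha if x != EPS)
--                 if EPS in first_alpha:
--                     sel.update(FOLLOW[A])
--                 select[(A, idx)] = sel
--     return select
-- ===== SOURCE B (Python) =====
-- EPS = 'ε'
--
-- def first_rec(secuencia, FIRST):
--     if not secuencia:
--         return {EPS}
--     fx = FIRST.get(secuencia[0], set())
--     rest = fx - {EPS}
--     if EPS in fx: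
--         return rest | first_rec(secuencia[1:], FIRST)
--     return rest
--
-- def calcular_select(gramatica, FIRST, FOLLOW):
--     def sel(A, prod):
--         if prod == [EPS]:
--             return set(FOLLOW[A])
--         f = first_rec(prod, FIRST)
--         extra = set(FOLLOW[A]) if EPS in f else set()
--         return (f - {EPS}) | extra
--     return {(A, i): sel(A, prod)
--             for A, prods in gramatica.items()
--             for i, prod in enumerate(prods)}
-- ===== Notes on version B (the rewrite author's own statement) =====
-- stated objective: simpler
-- what changed: first_de_secuencia's accumulate-until-break for/else loop over the production is replaced by a head/tail recursion expressing the FIRST recurrence (empty sequence -> {EPS}; else FIRST(head) minus EPS, union FIRST(tail) when head is nullable), and the SELECT table is built as a single dict comprehension instead of a mutated dict.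
import Mathlib
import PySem

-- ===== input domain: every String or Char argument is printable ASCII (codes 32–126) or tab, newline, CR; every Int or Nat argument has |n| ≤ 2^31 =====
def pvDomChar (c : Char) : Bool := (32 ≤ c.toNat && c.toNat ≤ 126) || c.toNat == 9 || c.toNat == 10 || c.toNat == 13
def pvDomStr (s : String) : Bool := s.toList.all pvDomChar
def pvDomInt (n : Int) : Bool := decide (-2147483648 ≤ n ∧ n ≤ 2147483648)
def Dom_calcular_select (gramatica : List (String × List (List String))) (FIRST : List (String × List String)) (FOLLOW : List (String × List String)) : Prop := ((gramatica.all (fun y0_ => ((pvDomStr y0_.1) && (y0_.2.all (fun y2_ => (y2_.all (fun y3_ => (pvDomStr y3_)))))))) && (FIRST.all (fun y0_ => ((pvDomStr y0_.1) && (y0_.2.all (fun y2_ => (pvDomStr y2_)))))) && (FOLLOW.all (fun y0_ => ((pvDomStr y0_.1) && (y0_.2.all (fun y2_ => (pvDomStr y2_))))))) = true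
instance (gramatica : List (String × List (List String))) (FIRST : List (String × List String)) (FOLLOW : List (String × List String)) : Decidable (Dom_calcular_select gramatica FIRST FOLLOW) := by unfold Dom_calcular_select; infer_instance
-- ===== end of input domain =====

-- B replaces A's accumulate-until-break for/else traversal of a production by a head/tail recursion
-- expressing the FIRST recurrence, and builds the SELECT table as one comprehension instead of a
-- mutated dict (objective: simpler; same cost).

def pvEPS : String := "ε"

-- shared primitive wrappers: FIRST.get(X, set()) and FOLLOW[A] (Pre_ excludes the KeyError case,
-- where the .getD [] default is never reached on admitted inputs)
def pvGet (d : List (String × List String)) (k : String) : List String :=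
  PySem.Dict.getD ⟨d⟩ k []
def pvFollow (d : List (String × List String)) (k : String) : List String :=
  (PySem.Dict.get? (⟨d⟩ : PySem.Dict String (List String)) k).getD []

-- ===== PORT A =====
-- the for/else loop of first_de_secuencia: accumulator resultado, break on a non-nullable symbol,
-- EPS added when the loop runs off the end
def pvFirstLoop (FIRST : List (String × List String)) : List String → PySem.Set String → PySem.Set String
  | [], res => PySem.Set.add res pvEPS
  | X :: rest, res =>
    let fx := pvGet FIRST X
    let res' := PySem.Set.update res (fx.filter (fun x => x != pvEPS))
    if pvEPS ∈ fx then pvFirstLoop FIRST rest res' else res'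

def pvFirstSeq (secuencia : List String) (FIRST : List (String × List String)) : PySem.Set String :=
  if secuencia = [] then PySem.Set.add PySem.Set.empty pvEPS
  else pvFirstLoop FIRST secuencia PySem.Set.empty

def calcular_select (gramatica : List (String × List (List String))) (FIRST : List (String × List String)) (FOLLOW : List (String × List String)) : List (String × Int × List String) :=
  (gramatica.foldl
    (fun d (p : String × List (List String)) =>
      (PySem.List.enumerate p.2).foldl
        (fun d (q : Int × List String) =>
          if q.2 = [pvEPS] then
            d.insert (p.1, q.1) (PySem.Set.ofList (pvFollow FOLLOW p.1))
          else
            let fa := pvFirstSeq q.2 FIRST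
            let sel := PySem.Set.ofList (fa.filter (fun x => x != pvEPS))
            let sel := if pvEPS ∈ fa then PySem.Set.update sel (pvFollow FOLLOW p.1) else sel
            d.insert (p.1, q.1) sel)
        d)
    (PySem.Dict.empty)).items.map (fun r => (r.1.1, r.1.2, r.2))

-- ===== PORT B =====
-- head/tail recursion: FIRST of the empty sequence is {EPS}; otherwise FIRST of the head minus EPS,
-- plus FIRST of the tail when the head is nullable
def pvFirstRec (FIRST : List (String × List String)) : List String → PySem.Set String
  | [] => PySem.Set.add PySem.Set.empty pvEPS
  | X :: rest =>
    let fx := pvGet FIRST X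
    let r := PySem.Set.diff fx [pvEPS]
    if pvEPS ∈ fx then PySem.Set.union r (pvFirstRec FIRST rest) else r

def pvSel (FIRST FOLLOW : List (String × List String)) (A : String) (prod : List String) : List String :=
  if prod = [pvEPS] then PySem.Set.ofList (pvFollow FOLLOW A)
  else
    let f := pvFirstRec FIRST prod
    let extra := if pvEPS ∈ f then PySem.Set.ofList (pvFollow FOLLOW A) else PySem.Set.empty
    PySem.Set.union (PySem.Set.diff f [pvEPS]) extra

def calcular_select_alt (gramatica : List (String × List (List String))) (FIRST : List (String × List String)) (FOLLOW : List (String × List String)) : List (String × Int × List String) :=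
  gramatica.flatMap (fun p =>
    (PySem.List.enumerate p.2).map (fun q => (p.1, q.1, pvSel FIRST FOLLOW p.1 q.2)))

-- ===== PRECONDITION & SPEC =====
-- Pre_ excludes (a) inputs where Python A raises KeyError: some production is [EPS] or consists
-- only of nullable symbols but FOLLOW has no entry for its left-hand side; and (b) association-list
-- encodings that no Python input can produce (gramatica is a dict, so its keys are distinct, and
-- FIRST's values are sets, so they hold distinct elements).
def Pre_calcular_select (gramatica : List (String × List (List String))) (FIRST : List (String × List String)) (FOLLOW : List (String × List String)) : Prop :=
  (gramatica.map Prod.fst).Nodup ∧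
  (∀ p ∈ FIRST, p.2.Nodup) ∧
  (∀ pr ∈ gramatica, ∀ prod ∈ pr.2,
     (prod = [pvEPS] ∨ ∀ X ∈ prod, pvEPS ∈ pvGet FIRST X) →
     (PySem.Dict.get? (⟨FOLLOW⟩ : PySem.Dict String (List String)) pr.1).isSome)
instance (gramatica : List (String × List (List String))) (FIRST : List (String × List String)) (FOLLOW : List (String × List String)) : Decidable (Pre_calcular_select gramatica FIRST FOLLOW) := by unfold Pre_calcular_select; infer_instance
def pvWitness_calcular_select : (List (String × List (List String))) × (List (String × List String)) × (List (String × List String)) :=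
  ([("S", [["a"], []])], [("a", ["a"])], [("S", ["$"])])
def Spec_calcular_select (gramatica : List (String × List (List String))) (FIRST : List (String × List String)) (FOLLOW : List (String × List String)) (out : List (String × Int × List String)) : Prop := out = calcular_select_alt gramatica FIRST FOLLOW
instance (gramatica : List (String × List (List String))) (FIRST : List (String × List String)) (FOLLOW : List (String × List String)) (out : List (String × Int × List String)) : Decidable (Spec_calcular_select gramatica FIRST FOLLOW out) := by unfold Spec_calcular_select; infer_instance

-- ===== CLAIM (what is proved, stated in full; the proofs are below) =====
def Claim_equal_calcular_select : Prop := ∀ (gramatica : List (String × List (List String))) (FIRST : List (String × List String)) (FOLLOW : List (String × List String)), Dom_calcular_select gramatica FIRST FOLLOW → Pre_calcular_select gramatica FIRST FOLLOW → Spec_calcular_select gramatica FIRST FOLLOW (calcular_select gramatica FIRST FOLLOW)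

-- ===== LEMMAS AND PROOFS =====

-- update ignores duplicates in its second argument
lemma pv_update_ofList {s : PySem.Set String} {xs : List String} :
    PySem.Set.update s (PySem.Set.ofList xs) = PySem.Set.update s xs := by
  rw [PySem.Set.update_eq_append_filter, PySem.Set.update_eq_append_filter,
    PySem.Set.ofList_ofList]

-- filtering away elements already in s does not change update
lemma pv_update_filter {s : PySem.Set String} {xs : List String} {p : String → Bool}
    (h : ∀ x ∈ xs, p x = false → x ∈ s) :
    PySem.Set.update s (xs.filter p) = PySem.Set.update s xs := by
  induction xs generalizing s with
  | nil => rfl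
  | cons x l ih =>
    by_cases hp : p x = true
    · rw [List.filter_cons_of_pos hp, PySem.Set.update_cons, PySem.Set.update_cons]
      exact ih (fun y hy hpy => (PySem.Set.mem_add _ _ _).2 (Or.inl (h y (List.mem_cons_of_mem _ hy) hpy)))
    · have hx : x ∈ s := h x (List.mem_cons_self) (by simpa using hp)
      rw [List.filter_cons_of_neg (by simpa using hp), PySem.Set.update_cons,
        PySem.Set.add_of_mem hx]
      exact ih (fun y hy hpy => h y (List.mem_cons_of_mem _ hy) hpy)

-- updating with an update is updating twice
lemma pv_update_update {s r : PySem.Set String} {t : List String} :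
    PySem.Set.update s (PySem.Set.update r t) = PySem.Set.update (PySem.Set.update s r) t := by
  rw [PySem.Set.update_eq_append_filter r t, PySem.Set.update_append]
  rw [pv_update_filter (fun x _ hx => by
    have hc : r.contains x = true := by simpa using hx
    exact (PySem.Set.mem_update s r x).2 (Or.inr ((PySem.Set.contains_iff r x).1 hc)))]
  exact pv_update_ofList

lemma pv_get_nodup {FIRST : List (String × List String)} (hF : ∀ p ∈ FIRST, p.2.Nodup)
    (X : String) : (pvGet FIRST X).Nodup := by
  induction FIRST with
  | nil => simp [pvGet, PySem.Dict.getD, PySem.Dict.get?]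
  | cons p rest ih =>
    obtain ⟨k, v⟩ := p
    simp only [pvGet, PySem.Dict.getD, PySem.Dict.get?_mk_cons]
    by_cases h : (k == X) = true
    · rw [if_pos h]
      simpa using hF (k, v) List.mem_cons_self
    · rw [if_neg h]
      simpa [pvGet, PySem.Dict.getD] using ih (fun q hq => hF q (List.mem_cons_of_mem _ hq))

-- diff by {EPS} is the filter A writes out
lemma pv_diff_eps (fx : List String) :
    PySem.Set.diff fx [pvEPS] = fx.filter (fun x => x != pvEPS) := by
  apply List.filter_congr
  intro x _
  have hc : PySem.Set.contains [pvEPS] x = (x == pvEPS) := by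
    simp [PySem.Set.contains_eq_listContains]
    exact (Bool.beq_eq_decide_eq x pvEPS).symm
  show (!PySem.Set.contains [pvEPS] x) = (x != pvEPS)
  rw [hc]
  rfl

lemma pv_firstRec_nodup {FIRST : List (String × List String)} (hF : ∀ p ∈ FIRST, p.2.Nodup)
    (seq : List String) : (pvFirstRec FIRST seq).Nodup := by
  induction seq with
  | nil => simp [pvFirstRec, PySem.Set.add, PySem.Set.empty]
  | cons X rest ih =>
    simp only [pvFirstRec]
    have hd : (PySem.Set.diff (pvGet FIRST X) [pvEPS]).Nodup :=
      PySem.Set.nodup_diff _ _ (pv_get_nodup hF X)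
    by_cases h : pvEPS ∈ pvGet FIRST X
    · simpa [h] using PySem.Set.nodup_union _ (pvFirstRec FIRST rest) hd
    · simpa [h] using hd

-- the loop of A equals "res updated with B's recursive FIRST"
lemma pv_loop_eq_rec (FIRST : List (String × List String))
    (seq : List String) : ∀ res : PySem.Set String,
    pvFirstLoop FIRST seq res = PySem.Set.update res (pvFirstRec FIRST seq) := by
  induction seq with
  | nil =>
    intro res
    simp [pvFirstLoop, pvFirstRec, PySem.Set.update, List.foldl, PySem.Set.add, PySem.Set.empty]
  | cons X rest ih =>
    intro res
    simp only [pvFirstLoop, pvFirstRec]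
    split_ifs with h
    · simp only [ih, PySem.Set.union]
      rw [pv_update_update, pv_diff_eps]
    · rw [pv_diff_eps]

-- the two FIRST-of-a-sequence computations agree
lemma pv_firstSeq_eq {FIRST : List (String × List String)} (hF : ∀ p ∈ FIRST, p.2.Nodup)
    (seq : List String) : pvFirstSeq seq FIRST = pvFirstRec FIRST seq := by
  rcases seq with _ | ⟨X, rest⟩
  · rfl
  · rw [pvFirstSeq, if_neg (by simp), pv_loop_eq_rec FIRST, PySem.Set.update_empty,
      PySem.Set.ofList_eq_self_of_nodup _ (pv_firstRec_nodup hF _)]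

-- the value A stores for (A, idx) is B's pvSel
lemma pv_val_eq {FIRST FOLLOW : List (String × List String)} (hF : ∀ p ∈ FIRST, p.2.Nodup)
    (A : String) (prod : List String) (h : ¬ prod = [pvEPS]) :
    (let fa := pvFirstSeq prod FIRST
     let sel := PySem.Set.ofList (fa.filter (fun x => x != pvEPS))
     if pvEPS ∈ fa then PySem.Set.update sel (pvFollow FOLLOW A) else sel) =
    pvSel FIRST FOLLOW A prod := by
  rw [pvSel, if_neg h]
  simp only [pv_firstSeq_eq hF]
  have hnd := pv_firstRec_nodup hF prod
  have hself : PySem.Set.ofList ((pvFirstRec FIRST prod).filter (fun x => x != pvEPS)) =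
      PySem.Set.diff (pvFirstRec FIRST prod) [pvEPS] := by
    rw [pv_diff_eps]
    exact PySem.Set.ofList_eq_self_of_nodup _ (List.Nodup.filter _ hnd)
  by_cases h2 : pvEPS ∈ pvFirstRec FIRST prod
  · simp only [h2, if_pos, hself, PySem.Set.union]
    exact (pv_update_ofList).symm
  · simp only [h2, hself, PySem.Set.union]
    rfl

-- one nonterminal's inner loop appends its fresh entries
lemma pv_inner (FIRST FOLLOW : List (String × List String)) (hF : ∀ p ∈ FIRST, p.2.Nodup)
    (A : String) (prods : List (List String)) (d : PySem.Dict (String × Int) (List String))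
    (hfresh : ∀ kv ∈ d.items, kv.1.1 ≠ A) :
    ((PySem.List.enumerate prods).foldl
      (fun d (q : Int × List String) =>
        if q.2 = [pvEPS] then
          d.insert (A, q.1) (PySem.Set.ofList (pvFollow FOLLOW A))
        else
          let fa := pvFirstSeq q.2 FIRST
          let sel := PySem.Set.ofList (fa.filter (fun x => x != pvEPS))
          let sel := if pvEPS ∈ fa then PySem.Set.update sel (pvFollow FOLLOW A) else sel
          d.insert (A, q.1) sel)
        d).items
    = d.items ++ (PySem.List.enumerate prods).map (fun q => ((A, q.1), pvSel FIRST FOLLOW A q.2)) := by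
  have hbody : (fun (d : PySem.Dict (String × Int) (List String)) (q : Int × List String) =>
      if q.2 = [pvEPS] then
        d.insert (A, q.1) (PySem.Set.ofList (pvFollow FOLLOW A))
      else
        let fa := pvFirstSeq q.2 FIRST
        let sel := PySem.Set.ofList (fa.filter (fun x => x != pvEPS))
        let sel := if pvEPS ∈ fa then PySem.Set.update sel (pvFollow FOLLOW A) else sel
        d.insert (A, q.1) sel)
      = fun d q => d.insert ((fun (q : Int × List String) => (A, q.1)) q)
          ((fun (q : Int × List String) => pvSel FIRST FOLLOW A q.2) q) := by
    funext d q
    by_cases h : q.2 = [pvEPS]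
    · simp only [h, if_pos, pvSel]
    · simp only [h, if_neg, not_false_iff]
      rw [pv_val_eq hF A q.2 h]
  rw [hbody]
  apply PySem.Dict.items_foldl_insert_fresh
  · intro q _
    rcases h : PySem.Dict.contains d (A, q.1) with _ | _
    · rfl
    · exfalso
      have := (PySem.Dict.contains_iff_mem_keys d (A, q.1)).1 h
      simp only [PySem.Dict.keys, List.mem_map] at this
      obtain ⟨kv, hkv, hk⟩ := this
      exact hfresh kv hkv (by rw [hk])
  · exact List.Pairwise.map _
      (fun a b hlt heq => by
        have : a.1 = b.1 := congrArg Prod.snd heq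
        omega)
      (PySem.List.pairwise_lt_enumerate prods 0)

-- the whole outer fold appends the flatMap, nonterminal by nonterminal
lemma pv_outer (FIRST FOLLOW : List (String × List String)) (hF : ∀ p ∈ FIRST, p.2.Nodup) :
    ∀ (gs : List (String × List (List String))) (d : PySem.Dict (String × Int) (List String)),
    (gs.map Prod.fst).Nodup →
    (∀ p ∈ gs, ∀ kv ∈ d.items, kv.1.1 ≠ p.1) →
    (gs.foldl
      (fun d (p : String × List (List String)) =>
        (PySem.List.enumerate p.2).foldl
          (fun d (q : Int × List String) =>
            if q.2 = [pvEPS] then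
              d.insert (p.1, q.1) (PySem.Set.ofList (pvFollow FOLLOW p.1))
            else
              let fa := pvFirstSeq q.2 FIRST
              let sel := PySem.Set.ofList (fa.filter (fun x => x != pvEPS))
              let sel := if pvEPS ∈ fa then PySem.Set.update sel (pvFollow FOLLOW p.1) else sel
              d.insert (p.1, q.1) sel)
          d)
      d).items
    = d.items ++ gs.flatMap (fun p =>
        (PySem.List.enumerate p.2).map (fun q => ((p.1, q.1), pvSel FIRST FOLLOW p.1 q.2))) := by
  intro gs
  induction gs with
  | nil => intro d _ _; simp
  | cons p rest ih =>
    intro d hnd hfresh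
    simp only [List.foldl_cons, List.flatMap_cons]
    have hinner := pv_inner FIRST FOLLOW hF p.1 p.2 d (hfresh p (List.mem_cons_self))
    have hnd' : (rest.map Prod.fst).Nodup := (List.nodup_cons.1 (by simpa using hnd)).2
    have hne : p.1 ∉ rest.map Prod.fst := (List.nodup_cons.1 (by simpa using hnd)).1
    rw [ih _ hnd' ?_, hinner, List.append_assoc]
    intro r hr kv hkv
    rw [hinner] at hkv
    rcases List.mem_append.1 hkv with h | h
    · exact hfresh r (List.mem_cons_of_mem _ hr) kv h
    · obtain ⟨q, _, hq⟩ := List.mem_map.1 h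
      rw [← hq]
      intro heq
      apply hne
      have hpr : p.1 = r.1 := heq
      rw [hpr]
      exact List.mem_map_of_mem hr

-- ===== VERDICT (by name: the statement is the Claim_ definition above) =====
theorem calcular_select_spec : Claim_equal_calcular_select := by
  intro gramatica FIRST FOLLOW _ hpre
  obtain ⟨hnd, hF, _⟩ := hpre
  show _ = _
  rw [calcular_select, calcular_select_alt,
    pv_outer FIRST FOLLOW hF gramatica PySem.Dict.empty hnd (by intro p _ kv hkv; cases hkv)]
  simp only [PySem.Dict.empty, List.nil_append, List.map_flatMap, List.map_map]
  rfl
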